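-- pv_equiv track=rewrite | github.com/makovalab-psu/142_human_Y-chr_palindromes_gene_conversion | gene_conversion/scripts/8_gc_analysis.py | cluster_positions
-- ===== SOURCE A (Python) =====
-- def cluster_positions(positions: list[int], max_dist: int) -> list[list[int]]:
--     if not positions:
--         return []
--     clusters = [[positions[0]]]
--     for pos in positions[1:]:
--         if pos - clusters[-1][-1] <= max_dist:
--             clusters[-1].append(pos)
--         else:
--             clusters.append([pos])
--     return clusters
-- ===== SOURCE B (Python) =====
-- def cluster_positions(positions: list[int], max_dist: int) -> list[list[int]]:
--     clusters = []   # finished clusters, collected back-to-front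
--     cur = []        # cluster currently being built, in reverse order
--     for pos in reversed(positions):
--         if cur and cur[-1] - pos > max_dist:
--             clusters.append(cur[::-1])
--             cur = [pos]
--         else:
--             cur.append(pos)
--     if cur:
--         clusters.append(cur[::-1])
--     return clusters[::-1]
-- ===== Notes on version B (the rewrite author's own statement) =====
-- stated objective: alternative
-- what changed: B builds the clusters back-to-front: it walks the positions in reverse, accumulates the current cluster in reversed order, flushes it (reversed back) when a gap exceeds max_dist, and finally reverses the cluster list, instead of A's forward walk mutating the last cluster of the result in place.
import Mathlib
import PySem

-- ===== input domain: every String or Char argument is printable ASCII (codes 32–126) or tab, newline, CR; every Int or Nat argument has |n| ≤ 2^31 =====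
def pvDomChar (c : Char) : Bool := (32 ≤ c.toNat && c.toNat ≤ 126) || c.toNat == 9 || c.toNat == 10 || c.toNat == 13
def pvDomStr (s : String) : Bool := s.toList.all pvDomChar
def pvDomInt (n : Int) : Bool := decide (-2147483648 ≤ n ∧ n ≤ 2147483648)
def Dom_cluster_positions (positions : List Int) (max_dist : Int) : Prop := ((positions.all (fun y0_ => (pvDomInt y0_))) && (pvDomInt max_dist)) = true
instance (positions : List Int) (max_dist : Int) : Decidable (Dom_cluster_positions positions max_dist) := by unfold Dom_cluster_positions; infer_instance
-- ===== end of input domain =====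

-- B builds the cluster list back-to-front: a reverse walk accumulating the current
-- cluster in reversed order and flushing it on a gap, instead of A's forward walk
-- mutating the last cluster of the result in place (alternative decomposition).

-- ===== PORT A =====
-- one loop step of A: clusters[-1].append(pos) or clusters.append([pos])
def pvStepA (max_dist : Int) (clusters : List (List Int)) (pos : Int) : List (List Int) :=
  if pos - (clusters.getLast!).getLast! ≤ max_dist then
    clusters.dropLast ++ [clusters.getLast! ++ [pos]]
  else
    clusters ++ [[pos]]

def cluster_positions (positions : List Int) (max_dist : Int) : List (List Int) :=
  match positions with
  | [] => []
  | p :: rest => rest.foldl (pvStepA max_dist) [[p]]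

-- ===== PORT B =====
-- one loop step of B: grow the reversed current cluster, or flush it and start a new one
def pvStepB (max_dist : Int) (st : List (List Int) × List Int) (pos : Int) : List (List Int) × List Int :=
  if st.2 ≠ [] ∧ st.2.getLast! - pos > max_dist then (st.1 ++ [st.2.reverse], [pos])
  else (st.1, st.2 ++ [pos])

def cluster_positions_alt (positions : List Int) (max_dist : Int) : List (List Int) :=
  let st := positions.reverse.foldl (pvStepB max_dist) ([], [])
  (if st.2 ≠ [] then st.1 ++ [st.2.reverse] else st.1).reverse

-- ===== PRECONDITION & SPEC =====
def Spec_cluster_positions (positions : List Int) (max_dist : Int) (out : List (List Int)) : Prop := out = cluster_positions_alt positions max_dist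
instance (positions : List Int) (max_dist : Int) (out : List (List Int)) : Decidable (Spec_cluster_positions positions max_dist out) := by unfold Spec_cluster_positions; infer_instance

-- ===== CLAIM (what is proved, stated in full; the proofs are below) =====
def Claim_equal_cluster_positions : Prop := ∀ (positions : List Int) (max_dist : Int), Dom_cluster_positions positions max_dist → Spec_cluster_positions positions max_dist (cluster_positions positions max_dist)

-- ===== LEMMAS AND PROOFS =====

theorem pv_getLast!_concat {α : Type} [Inhabited α] (l : List α) (a : α) : (l ++ [a]).getLast! = a := by
  induction l <;> simp_all [List.getLast!]

-- canonical recursive grouping: (first cluster, remaining clusters) of x :: rest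
def pvGrp (d : Int) (x : Int) : List Int → List Int × List (List Int)
  | [] => ([x], [])
  | q :: rs =>
    let r := pvGrp d q rs
    if q - x ≤ d then (x :: r.1, r.2) else ([x], r.1 :: r.2)

theorem pvGrp_head (d x : Int) (rs : List Int) : ∃ t, (pvGrp d x rs).1 = x :: t := by
  cases rs with
  | nil => exact ⟨[], rfl⟩
  | cons q rs =>
    simp only [pvGrp]
    split_ifs <;> exact ⟨_, rfl⟩

theorem pvFoldA (d : Int) : ∀ (rest : List Int) (acc : List (List Int)) (pre : List Int) (x : Int),
    List.foldl (pvStepA d) (acc ++ [pre ++ [x]]) rest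
      = acc ++ (pre ++ (pvGrp d x rest).1) :: (pvGrp d x rest).2 := by
  intro rest
  induction rest with
  | nil => intro acc pre x; simp [pvGrp]
  | cons q rs ih =>
    intro acc pre x
    have hlast : (acc ++ [pre ++ [x]]).getLast! = pre ++ [x] := pv_getLast!_concat _ _
    rw [List.foldl_cons]
    by_cases h : q - x ≤ d
    · have hs : pvStepA d (acc ++ [pre ++ [x]]) q = acc ++ [(pre ++ [x]) ++ [q]] := by
        simp only [pvStepA, hlast, pv_getLast!_concat, List.dropLast_concat, h, if_true]
      rw [hs, ih acc (pre ++ [x]) q]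
      simp [pvGrp, h]
    · have hs : pvStepA d (acc ++ [pre ++ [x]]) q = (acc ++ [pre ++ [x]]) ++ [([] : List Int) ++ [q]] := by
        simp only [pvStepA, hlast, pv_getLast!_concat, h, if_false, List.nil_append]
      rw [hs, ih (acc ++ [pre ++ [x]]) [] q]
      simp [pvGrp, h]

theorem pvFoldB (d : Int) : ∀ (rest : List Int) (x : Int),
    List.foldl (pvStepB d) ([], []) ((x :: rest).reverse)
      = ((pvGrp d x rest).2.reverse, (pvGrp d x rest).1.reverse) := by
  intro rest
  induction rest with
  | nil => intro x; simp [pvStepB, pvGrp]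
  | cons q rs ih =>
    intro x
    have hstep : List.foldl (pvStepB d) ([], []) ((x :: q :: rs).reverse)
        = pvStepB d (List.foldl (pvStepB d) ([], []) ((q :: rs).reverse)) x := by
      have : (x :: q :: rs).reverse = (q :: rs).reverse ++ [x] := by simp
      rw [this, List.foldl_append, List.foldl_cons, List.foldl_nil]
    obtain ⟨t, ht⟩ := pvGrp_head d q rs
    have hcur : (pvGrp d q rs).1.reverse.getLast! = q := by
      rw [ht]; simp only [List.reverse_cons]; exact pv_getLast!_concat t.reverse q
    have hne : (pvGrp d q rs).1.reverse ≠ [] := by simp [ht]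
    rw [hstep, ih q]
    by_cases h : q - x ≤ d
    · have hcond : ¬((pvGrp d q rs).1.reverse ≠ [] ∧ (pvGrp d q rs).1.reverse.getLast! - x > d) := by
        rw [hcur]; omega
      simp only [pvStepB, hcond, if_false, pvGrp, h, if_true]
      simp
    · have hcond : ((pvGrp d q rs).1.reverse ≠ [] ∧ (pvGrp d q rs).1.reverse.getLast! - x > d) := by
        refine ⟨hne, ?_⟩; rw [hcur]; omega
      simp only [pvStepB, hcond, pvGrp, h, if_false]
      simp [ht]

-- ===== VERDICT (by name: the statement is the Claim_ definition above) =====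
theorem cluster_positions_spec : Claim_equal_cluster_positions := by
  intro positions max_dist _
  unfold Spec_cluster_positions cluster_positions cluster_positions_alt
  cases positions with
  | nil => rfl
  | cons p rest =>
    rw [pvFoldB max_dist rest p]
    have hA := pvFoldA max_dist rest [] [] p
    obtain ⟨t, ht⟩ := pvGrp_head max_dist p rest
    have hne : (pvGrp max_dist p rest).1.reverse ≠ [] := by simp [ht]
    simp only [hne, if_pos, ne_eq, not_false_eq_true]
    simp only [List.nil_append] at hA
    rw [hA]
    simp
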